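-- pv_equiv track=rewrite | github.com/Marshal1101/DataStructure-Algorithm-Study | baekjoon/ImplementationQuestion2/047-23291-어항정리-exp.py | fly
-- ===== SOURCE A (Python) =====
-- def fly(lst):
--     R = len(lst) // 2 # 가로
--     new = []
--     new.append(lst[:R][::-1])
--     new.append(lst[R:])
--
--     R = R // 2
--
--
--     new2 = []
--     for i in range(1, -1, -1):
--         new2.append(new[i][:R][::-1])
--         new[i] = new[i][R:]
--
--     new2.extend(new)
--     return new2
-- ===== SOURCE B (Python) =====
-- def fly(lst):
--     half = len(lst) // 2
--     quarter = half // 2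
--     top_rev, mid, bottom_rev, tail = [], [], [], []
--     for i, x in enumerate(lst):
--         if i < half - quarter:
--             bottom_rev.insert(0, x)
--         elif i < half:
--             mid.append(x)
--         elif i < half + quarter:
--             top_rev.insert(0, x)
--         else:
--             tail.append(x)
--     return [top_rev, mid, bottom_rev, tail]
-- ===== Notes on version B (the rewrite author's own statement) =====
-- stated objective: alternative
-- what changed: B makes a single pass over the input, routing each element by its index into one of four accumulator rows (prepending into the two rows that end up reversed), instead of A's staged slicing/reversal of intermediate lists.
import Mathlib
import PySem

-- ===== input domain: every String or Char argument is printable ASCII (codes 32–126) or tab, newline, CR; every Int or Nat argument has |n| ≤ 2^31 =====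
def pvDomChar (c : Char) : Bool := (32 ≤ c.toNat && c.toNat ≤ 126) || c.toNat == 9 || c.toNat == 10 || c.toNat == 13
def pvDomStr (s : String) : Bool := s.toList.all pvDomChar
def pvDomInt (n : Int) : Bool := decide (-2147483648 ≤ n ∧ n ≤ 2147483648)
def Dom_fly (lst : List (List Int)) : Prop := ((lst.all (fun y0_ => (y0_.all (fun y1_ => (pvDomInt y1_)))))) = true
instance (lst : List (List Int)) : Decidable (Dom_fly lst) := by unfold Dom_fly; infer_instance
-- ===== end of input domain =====

-- ===== PORT A =====
-- lst[:R][::-1] and [::-1] inside the loop are ported as PySem slice + List.reverse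
-- (exact: a [::-1] slice is list reversal, cf. PySem.List.slice?_none_none_neg_one).
def fly (lst : List (List Int)) : List (List (List Int)) :=
  let R := PySem.Int.floordiv (lst.length : Int) 2
  let new : List (List (List Int)) :=
    ([] ++ [(PySem.List.slice lst none (some R)).reverse]) ++ [PySem.List.slice lst (some R) none]
  let R2 := PySem.Int.floordiv R 2
  let st := (PySem.List.pyRange 1 (-1) (-1)).foldl
      (fun (s : List (List (List Int)) × List (List (List Int))) i =>
        let row := PySem.List.pyGetD s.2 i []
        (s.1 ++ [(PySem.List.slice row none (some R2)).reverse],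
         PySem.List.pySetD s.2 i (PySem.List.slice row (some R2) none)))
      ([], new)
  st.1 ++ st.2

-- ===== PORT B =====
-- One honest line: B is a single pass over the input that routes each element by
-- its index into one of four accumulator rows (prepending into the two rows that
-- come out reversed); no intermediate lists, no slicing (objective: alternative).
-- The loop body of Source B as a named step function (branches in Source B's order);
-- state = (top_rev, mid, bottom_rev, tail).
def flyStep (t1 t2 t3 : Int)
    (s : List (List Int) × List (List Int) × List (List Int) × List (List Int))
    (p : Int × List Int) :
    List (List Int) × List (List Int) × List (List Int) × List (List Int) :=
  if p.1 < t1 then (s.1, s.2.1, p.2 :: s.2.2.1, s.2.2.2)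
  else if p.1 < t2 then (s.1, s.2.1 ++ [p.2], s.2.2.1, s.2.2.2)
  else if p.1 < t3 then (p.2 :: s.1, s.2.1, s.2.2.1, s.2.2.2)
  else (s.1, s.2.1, s.2.2.1, s.2.2.2 ++ [p.2])

def fly_alt (lst : List (List Int)) : List (List (List Int)) :=
  let half := PySem.Int.floordiv (lst.length : Int) 2
  let quarter := PySem.Int.floordiv half 2
  let st := (PySem.List.enumerate lst).foldl
      (flyStep (half - quarter) half (half + quarter)) ([], [], [], [])
  [st.1, st.2.1, st.2.2.1, st.2.2.2]

-- ===== PRECONDITION & SPEC =====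
def Spec_fly (lst : List (List Int)) (out : List (List (List Int))) : Prop := out = fly_alt lst
instance (lst : List (List Int)) (out : List (List (List Int))) : Decidable (Spec_fly lst out) := by unfold Spec_fly; infer_instance

-- ===== CLAIM (what is proved, stated in full; the proofs are below) =====
def Claim_equal_fly : Prop := ∀ (lst : List (List Int)), Dom_fly lst → Spec_fly lst (fly lst)

-- ===== LEMMAS AND PROOFS =====

-- The common value both programs compute, with a = len//2, b = a//2.
def flyRows (lst : List (List Int)) : List (List (List Int)) :=
  let a := lst.length / 2
  let b := a / 2
  [ ((lst.drop a).take b).reverse,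
    (lst.drop (a - b)).take b,
    (lst.take (a - b)).reverse,
    lst.drop (a + b) ]

set_option maxHeartbeats 1000000 in
theorem fly_eq_rows (lst : List (List Int)) : fly lst = flyRows lst := by
  have hrange : PySem.List.pyRange 1 (-1) (-1) = [1, 0] := by decide
  have h1 : PySem.Int.floordiv (lst.length:Int) 2 = ((lst.length/2 : Nat):Int) := by
    exact_mod_cast PySem.Int.floordiv_natCast lst.length 2
  have h2 : PySem.Int.floordiv ((lst.length/2:Nat):Int) 2 = ((lst.length/2/2 : Nat):Int) := by
    exact_mod_cast PySem.Int.floordiv_natCast (lst.length/2) 2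
  simp only [fly, flyRows, hrange, List.foldl, List.nil_append, h1, h2]
  clear h1 h2 hrange
  have hb : lst.length/2/2 ≤ lst.length/2 := Nat.div_le_self _ _
  have ha : lst.length/2 ≤ lst.length := Nat.div_le_self _ _
  generalize lst.length / 2 / 2 = b at *
  generalize lst.length / 2 = a at *
  simp only [PySem.List.slice_to_natCast, PySem.List.slice_from_natCast]
  simp [pysem]
  have hlen : (lst.take a).length = a := by simp; omega
  constructor
  · rw [List.take_reverse, List.reverse_reverse, hlen, List.drop_take]
    congr 1
    omega
  · rw [List.drop_reverse, hlen, List.take_take]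
    congr 2
    omega

theorem fold_branch1 (t1 t2 t3 : Int) :
    ∀ (c : List (List Int)) (s : Int)
      (r0 r1 r2 r3 : List (List Int)), s + c.length ≤ t1 →
      (PySem.List.enumerate c s).foldl (flyStep t1 t2 t3) (r0, r1, r2, r3)
        = (r0, r1, c.reverse ++ r2, r3) := by
  intro c
  induction c with
  | nil => intro s r0 r1 r2 r3 h; simp [PySem.List.enumerate_nil]
  | cons x c ih =>
      intro s r0 r1 r2 r3 h
      have hlt : s < t1 := by simp at h; omega
      rw [PySem.List.enumerate_cons]
      simp only [List.foldl_cons, flyStep, if_pos hlt]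
      rw [ih (s+1) _ _ _ _ (by simp at h ⊢; omega)]
      simp

theorem fold_branch2 (t1 t2 t3 : Int) :
    ∀ (c : List (List Int)) (s : Int)
      (r0 r1 r2 r3 : List (List Int)), t1 ≤ s → s + c.length ≤ t2 →
      (PySem.List.enumerate c s).foldl (flyStep t1 t2 t3) (r0, r1, r2, r3)
        = (r0, r1 ++ c, r2, r3) := by
  intro c
  induction c with
  | nil => intro s r0 r1 r2 r3 h1 h2; simp [PySem.List.enumerate_nil]
  | cons x c ih =>
      intro s r0 r1 r2 r3 h1 h2
      have hlt : s < t2 := by simp at h2; omega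
      rw [PySem.List.enumerate_cons]
      simp only [List.foldl_cons, flyStep, if_neg (by omega : ¬ s < t1), if_pos hlt]
      rw [ih (s+1) _ _ _ _ (by omega) (by simp at h2 ⊢; omega)]
      simp

theorem fold_branch3 (t1 t2 t3 : Int) (h12 : t1 ≤ t2) :
    ∀ (c : List (List Int)) (s : Int)
      (r0 r1 r2 r3 : List (List Int)), t2 ≤ s → s + c.length ≤ t3 →
      (PySem.List.enumerate c s).foldl (flyStep t1 t2 t3) (r0, r1, r2, r3)
        = (c.reverse ++ r0, r1, r2, r3) := by
  intro c
  induction c with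
  | nil => intro s r0 r1 r2 r3 h1 h2; simp [PySem.List.enumerate_nil]
  | cons x c ih =>
      intro s r0 r1 r2 r3 h1 h2
      have hlt : s < t3 := by simp at h2; omega
      rw [PySem.List.enumerate_cons]
      simp only [List.foldl_cons, flyStep, if_neg (by omega : ¬ s < t1),
        if_neg (by omega : ¬ s < t2), if_pos hlt]
      rw [ih (s+1) _ _ _ _ (by omega) (by simp at h2 ⊢; omega)]
      simp

theorem fold_branch4 (t1 t2 t3 : Int) (h12 : t1 ≤ t2) (h23 : t2 ≤ t3) :
    ∀ (c : List (List Int)) (s : Int)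
      (r0 r1 r2 r3 : List (List Int)), t3 ≤ s →
      (PySem.List.enumerate c s).foldl (flyStep t1 t2 t3) (r0, r1, r2, r3)
        = (r0, r1, r2, r3 ++ c) := by
  intro c
  induction c with
  | nil => intro s r0 r1 r2 r3 h; simp [PySem.List.enumerate_nil]
  | cons x c ih =>
      intro s r0 r1 r2 r3 h
      rw [PySem.List.enumerate_cons]
      simp only [List.foldl_cons, flyStep, if_neg (by omega : ¬ s < t1),
        if_neg (by omega : ¬ s < t2), if_neg (by omega : ¬ s < t3)]
      rw [ih (s+1) _ _ _ _ (by omega)]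
      simp

set_option maxHeartbeats 1000000 in
theorem fly_alt_eq_rows (lst : List (List Int)) : fly_alt lst = flyRows lst := by
  have h1 : PySem.Int.floordiv (lst.length:Int) 2 = ((lst.length/2 : Nat):Int) := by
    exact_mod_cast PySem.Int.floordiv_natCast lst.length 2
  have h2 : PySem.Int.floordiv ((lst.length/2:Nat):Int) 2 = ((lst.length/2/2 : Nat):Int) := by
    exact_mod_cast PySem.Int.floordiv_natCast (lst.length/2) 2
  simp only [fly_alt, flyRows, h1, h2]
  clear h1 h2
  have hb : lst.length/2/2 ≤ lst.length/2 := Nat.div_le_self _ _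
  have ha2 : 2 * (lst.length / 2) ≤ lst.length := by omega
  generalize hB : lst.length / 2 / 2 = b at *
  generalize hA : lst.length / 2 = a at *
  have h4 : lst.drop a = (lst.drop a).take b ++ lst.drop (a + b) := by
    conv_lhs => rw [← List.take_append_drop b (lst.drop a)]
    rw [List.drop_drop]
  have h3 : lst.drop (a - b) = (lst.drop (a - b)).take b ++ lst.drop a := by
    conv_lhs => rw [← List.take_append_drop b (lst.drop (a - b))]
    rw [List.drop_drop, Nat.sub_add_cancel hb]
  have hsplit : lst = lst.take (a - b) ++ ((lst.drop (a - b)).take b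
      ++ ((lst.drop a).take b ++ lst.drop (a + b))) := by
    conv_lhs => rw [← List.take_append_drop (a - b) lst, h3, h4]
  have l1 : (lst.take (a - b)).length = a - b := by simp; omega
  have l2 : ((lst.drop (a - b)).take b).length = b := by simp; omega
  have l3 : ((lst.drop a).take b).length = b := by simp; omega
  conv_lhs => rw [hsplit]
  rw [PySem.List.enumerate_append, PySem.List.enumerate_append, PySem.List.enumerate_append]
  rw [List.foldl_append, List.foldl_append, List.foldl_append]
  rw [l1, l2, l3]
  rw [fold_branch1 (↑a - ↑b) (↑a) (↑a + ↑b) (lst.take (a - b)) 0 [] [] [] []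
      (by rw [l1]; omega)]
  rw [fold_branch2 (↑a - ↑b) (↑a) (↑a + ↑b) ((lst.drop (a - b)).take b) (0 + ↑(a - b))
      _ _ _ _ (by omega) (by rw [l2]; omega)]
  rw [fold_branch3 (↑a - ↑b) (↑a) (↑a + ↑b) (by omega) ((lst.drop a).take b)
      (0 + ↑(a - b) + ↑b) _ _ _ _ (by omega) (by rw [l3]; omega)]
  rw [fold_branch4 (↑a - ↑b) (↑a) (↑a + ↑b) (by omega) (by omega)
      (lst.drop (a + b)) (0 + ↑(a - b) + ↑b + ↑b) _ _ _ _ (by omega)]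
  simp

-- ===== VERDICT (by name: the statement is the Claim_ definition above) =====
theorem fly_spec : Claim_equal_fly := by
  intro lst _
  unfold Spec_fly
  rw [fly_eq_rows, fly_alt_eq_rows]
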